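-- pv_equiv track=rewrite | github.com/dajeong-kimm/algorithm | SWEA/D3/1220. ［S／W 문제해결 기본］ 5일차 － Magnetic/［S／W 문제해결 기본］ 5일차 － Magnetic.py | count_deadlock
-- ===== SOURCE A (Python) =====
-- def count_deadlock(tmp):
--     result = 0
--     before = "white"
--     dict = {1:"red",2:"blue"}
--     for t in tmp:
--         if before == "red" and dict[t] == "blue":
--             result += 1
--         before = dict[t]
--     return result
-- ===== SOURCE B (Python) =====
-- def count_deadlock(tmp):
--     d = {1: "red", 2: "blue"}
--     s = "".join(d[t][0] for t in tmp)
--     return s.count("rb")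
-- ===== Notes on version B (the rewrite author's own statement) =====
-- stated objective: alternative
-- what changed: B serializes the sequence to a string of colour initials ('r'/'b') and returns str.count('rb') -- substring pattern counting replaces A's explicit state-machine scan; the dict lookup is kept so out-of-range elements still raise KeyError.
import Mathlib
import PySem

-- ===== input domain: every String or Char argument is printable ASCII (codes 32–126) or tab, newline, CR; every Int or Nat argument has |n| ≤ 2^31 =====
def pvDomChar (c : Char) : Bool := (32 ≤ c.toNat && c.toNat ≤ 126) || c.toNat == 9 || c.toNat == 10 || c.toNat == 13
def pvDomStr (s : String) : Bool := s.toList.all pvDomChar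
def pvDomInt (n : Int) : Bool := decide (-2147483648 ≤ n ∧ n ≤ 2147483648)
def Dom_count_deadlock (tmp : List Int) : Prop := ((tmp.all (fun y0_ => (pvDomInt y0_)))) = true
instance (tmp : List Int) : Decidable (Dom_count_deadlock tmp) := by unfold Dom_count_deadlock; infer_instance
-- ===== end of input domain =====

-- B serializes to a string of colour initials and counts the pattern "rb" with str.count instead of A's stateful scan; A's KeyError inputs are excluded by Pre_.

-- ===== PORT A =====
def count_deadlock (tmp : List Int) : Int :=
  let d : PySem.Dict Int String := PySem.Dict.ofList [(1, "red"), (2, "blue")]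
  (tmp.foldl (fun st t =>
      let c := (d.get? t).getD ""   -- dict[t]; Pre_ excludes the KeyError (missing-key) inputs
      (if st.2 == "red" && c == "blue" then st.1 + 1 else st.1, c))
    ((0 : Int), "white")).1

-- ===== PORT B =====
-- B-side helper: d[t][0] for d = {1:"red",2:"blue"}; Pre_ excludes the missing-key (KeyError) inputs, so the ' ' defaults are never taken
def initialOf (t : Int) : Char :=
  (PySem.Str.pyGet?
      (((PySem.Dict.ofList [(1, "red"), (2, "blue")] : PySem.Dict Int String).get? t).getD "")
      0).getD ' '

def count_deadlock_alt (tmp : List Int) : Int :=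
  let s : List Char := tmp.map initialOf          -- "".join(d[t][0] for t in tmp)
  ((PySem.Chars.count s ['r', 'b'] : Nat) : Int)  -- s.count("rb")

-- ===== PRECONDITION & SPEC =====
-- Pre_ excludes exactly the inputs on which A raises KeyError (an element not in the dict {1,2}).
def Pre_count_deadlock (tmp : List Int) : Prop :=
  (tmp.all (fun t => t == 1 || t == 2)) = true
instance (tmp : List Int) : Decidable (Pre_count_deadlock tmp) := by unfold Pre_count_deadlock; infer_instance
def pvWitness_count_deadlock : List Int := [1, 2, 2, 1, 1, 2]

def Spec_count_deadlock (tmp : List Int) (out : Int) : Prop := out = count_deadlock_alt tmp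
instance (tmp : List Int) (out : Int) : Decidable (Spec_count_deadlock tmp out) := by unfold Spec_count_deadlock; infer_instance

-- ===== CLAIM (what is proved, stated in full; the proofs are below) =====
def Claim_equal_count_deadlock : Prop := ∀ (tmp : List Int), Dom_count_deadlock tmp → Pre_count_deadlock tmp → Spec_count_deadlock tmp (count_deadlock tmp)

-- ===== LEMMAS AND PROOFS =====

-- the number of adjacent ('r','b') pairs, used only in the proofs
def pairsRB : List Char → Nat
  | a :: b :: t => (if a = 'r' ∧ b = 'b' then 1 else 0) + pairsRB (b :: t)
  | _ => 0

lemma initialOf_one : initialOf 1 = 'r' := rfl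
lemma initialOf_two : initialOf 2 = 'b' := rfl

-- the fuel-based search loop of Chars.count, for the pattern "rb", counts exactly the adjacent ('r','b') pairs
lemma go_eq_pairsRB (fuel : Nat) (s : List Char) (acc : Nat)
    (hf : s.length ≤ fuel) (hs : ∀ c ∈ s, c = 'r' ∨ c = 'b') :
    PySem.Chars.count.go ['r', 'b'] fuel s acc = acc + pairsRB s := by
  induction fuel using Nat.strong_induction_on generalizing s acc with
  | _ fuel ih =>
    match fuel, s with
    | 0, s =>
      interval_cases hl : s.length
      · rw [List.length_eq_zero_iff.mp hl]; rfl
    | Nat.succ f, [] => rfl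
    | Nat.succ f, c :: t =>
      rw [PySem.Chars.count.go]
      by_cases hp : List.isPrefixOf ['r', 'b'] (c :: t) = true
      · rw [if_pos hp]
        match t, hp with
        | [], hp => simp [List.isPrefixOf] at hp
        | b :: t2, hp =>
          have hcb : 'r' = c ∧ 'b' = b := by simpa [List.isPrefixOf] using hp
          obtain ⟨hc, hb⟩ := hcb; subst hc; subst hb
          have ht2 : ∀ x ∈ t2, x = 'r' ∨ x = 'b' := fun x hx => hs x (by simp [hx])
          have hlen : t2.length ≤ f := by simp at hf; omega
          rw [show List.drop (['r','b'] : List Char).length ('r' :: 'b' :: t2) = t2 from rfl]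
          rw [ih f (Nat.lt_succ_self f) t2 (acc + 1) hlen ht2]
          have h2 : pairsRB ('b' :: t2) = pairsRB t2 := by
            cases t2 with
            | nil => rfl
            | cons x t3 => simp [pairsRB]
          simp [pairsRB, h2]; omega
      · rw [if_neg hp]
        have ht : ∀ x ∈ t, x = 'r' ∨ x = 'b' := fun x hx => hs x (by simp [hx])
        have hlen : t.length ≤ f := by simp at hf; omega
        rw [ih f (Nat.lt_succ_self f) t acc hlen ht]
        have h2 : pairsRB (c :: t) = pairsRB t := by
          cases t with
          | nil => rfl
          | cons b t2 =>
            have hne : ¬ (c = 'r' ∧ b = 'b') := by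
              intro ⟨h1, h2⟩; subst h1; subst h2
              exact hp (by simp [List.isPrefixOf])
            simp [pairsRB, hne]
        omega

lemma count_eq_pairsRB (s : List Char) (hs : ∀ c ∈ s, c = 'r' ∨ c = 'b') :
    PySem.Chars.count s ['r', 'b'] = pairsRB s := by
  show (if (['r','b'] : List Char).isEmpty = true then s.length + 1
        else PySem.Chars.count.go ['r','b'] s.length s 0) = pairsRB s
  rw [if_neg (by decide)]
  simpa using go_eq_pairsRB s.length s 0 le_rfl hs

-- A's loop step, as a named function used only in the proofs
def stepA (st : Int × String) (t : Int) : Int × String :=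
  let d : PySem.Dict Int String := PySem.Dict.ofList [(1, "red"), (2, "blue")]
  let c := (d.get? t).getD ""
  (if st.2 == "red" && c == "blue" then st.1 + 1 else st.1, c)

-- pairsRB over the mapped initials, expressed on the Int list
def pairCount : List Int → Int
  | t1 :: t2 :: rest => (if t1 = 1 ∧ t2 = 2 then 1 else 0) + pairCount (t2 :: rest)
  | _ => 0

lemma pairsRB_map (tmp : List Int) (h : ∀ t ∈ tmp, t = 1 ∨ t = 2) :
    (pairsRB (tmp.map initialOf) : Int) = pairCount tmp := by
  induction tmp with
  | nil => rfl
  | cons t rest ih =>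
    cases rest with
    | nil =>
      rcases h t (by simp) with h1 | h1 <;> subst h1 <;> rfl
    | cons t2 rest2 =>
      have ht : t = 1 ∨ t = 2 := h t (by simp)
      have ht2 : t2 = 1 ∨ t2 = 2 := h t2 (by simp)
      have h' : ∀ x ∈ t2 :: rest2, x = 1 ∨ x = 2 := fun x hx => h x (by simp at hx ⊢; tauto)
      have ihr := ih h'
      simp only [List.map_cons] at ihr ⊢
      rcases ht with h1 | h1 <;> rcases ht2 with h2 | h2 <;> subst h1 <;> subst h2 <;>
        simp [pairsRB, pairCount, initialOf_one, initialOf_two] at ihr ⊢ <;> omega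

lemma foldA_eq (tmp : List Int) (h : ∀ t ∈ tmp, t = 1 ∨ t = 2)
    (r : Int) (t0 : Int) (h0 : t0 = 1 ∨ t0 = 2) :
    (tmp.foldl stepA (r, ((PySem.Dict.ofList [(1, "red"), (2, "blue")] : PySem.Dict Int String).get? t0).getD "")).1
      = r + pairCount (t0 :: tmp) := by
  induction tmp generalizing r t0 with
  | nil => simp [pairCount]
  | cons t rest ih =>
    have ht : t = 1 ∨ t = 2 := h t (by simp)
    have hrest : ∀ x ∈ rest, x = 1 ∨ x = 2 := fun x hx => h x (by simp [hx])
    simp only [List.foldl_cons]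
    have hstep : stepA (r, ((PySem.Dict.ofList [(1, "red"), (2, "blue")] : PySem.Dict Int String).get? t0).getD "") t
        = (r + (if t0 = 1 ∧ t = 2 then 1 else 0),
           ((PySem.Dict.ofList [(1, "red"), (2, "blue")] : PySem.Dict Int String).get? t).getD "") := by
      have d1 : ((PySem.Dict.ofList [(1, "red"), (2, "blue")] : PySem.Dict Int String).get? 1).getD "" = "red" := rfl
      have d2 : ((PySem.Dict.ofList [(1, "red"), (2, "blue")] : PySem.Dict Int String).get? 2).getD "" = "blue" := rfl
      rcases h0 with h0 | h0 <;> rcases ht with ht | ht <;>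
        subst h0 <;> subst ht <;> simp [stepA, d1, d2]
    rw [hstep, ih hrest _ t ht]
    simp only [pairCount]
    ring

theorem count_deadlock_eq_alt (tmp : List Int) (h : Pre_count_deadlock tmp) :
    count_deadlock tmp = count_deadlock_alt tmp := by
  have hall : ∀ t ∈ tmp, t = 1 ∨ t = 2 := by
    intro t ht
    have := List.all_eq_true.mp h t ht
    simpa using this
  have hchars : ∀ c ∈ tmp.map initialOf, c = 'r' ∨ c = 'b' := by
    intro c hc
    obtain ⟨t, ht, rfl⟩ := List.mem_map.mp hc
    rcases hall t ht with h1 | h1 <;> subst h1 <;> simp [initialOf_one, initialOf_two]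
  have hB : count_deadlock_alt tmp = pairCount tmp := by
    show ((PySem.Chars.count (tmp.map initialOf) ['r', 'b'] : Nat) : Int) = pairCount tmp
    rw [count_eq_pairsRB _ hchars, pairsRB_map tmp hall]
  rw [hB]
  cases tmp with
  | nil => rfl
  | cons t rest =>
    have ht : t = 1 ∨ t = 2 := hall t (by simp)
    have hrest : ∀ x ∈ rest, x = 1 ∨ x = 2 := fun x hx => hall x (by simp [hx])
    have hport : count_deadlock (t :: rest)
        = (List.foldl stepA ((0 : Int), "white") (t :: rest)).1 := rfl
    rw [hport]
    have hfirst : stepA ((0 : Int), "white") t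
        = ((0 : Int), ((PySem.Dict.ofList [(1, "red"), (2, "blue")] : PySem.Dict Int String).get? t).getD "") := by
      rcases ht with ht | ht <;> subst ht <;> rfl
    calc (List.foldl stepA ((0 : Int), "white") (t :: rest)).1
        = (List.foldl stepA ((0 : Int), ((PySem.Dict.ofList [(1, "red"), (2, "blue")] : PySem.Dict Int String).get? t).getD "") rest).1 := by
          simp only [List.foldl_cons, hfirst]
      _ = 0 + pairCount (t :: rest) := foldA_eq rest hrest 0 t ht
      _ = pairCount (t :: rest) := by ring

-- ===== VERDICT =====
theorem count_deadlock_spec : Claim_equal_count_deadlock := by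
  intro tmp _ hpre
  exact count_deadlock_eq_alt tmp hpre
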